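-- pv_equiv track=rewrite | github.com/porkfrnd/Bit-Calc | bit_calc/Bitwise_operators.py | not_func
-- ===== SOURCE A (Python) =====
-- def bin_func(a,b=None):
-- 	if b:
-- 		a_bin = "{0:b}".format(a)
-- 		b_bin = "{0:b}".format(b)
-- 		a_len = len(a_bin)
-- 		b_len = len(b_bin)
-- 		if a_len > b_len:
-- 				req_len = a_len - b_len
-- 				b_bin = f"{'0'*req_len}{b_bin}"
-- 		elif b_len > a_len:
-- 				req_len = b_len - a_len
-- 				a_bin = f"{'0'*req_len}{a_bin}"
-- 		return a_bin, b_bin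
-- 	else:
-- 		a_bin = "{0:b}".format(a)
-- 		return a_bin
--
-- def not_func(a):
-- 	a_bin = bin_func(a)
-- 	result_bin = ""
-- 	for x in a_bin:
-- 		if x == "0":
-- 			result_bin += "1"
-- 		elif x == "1":
-- 			result_bin += "0"
-- 	result = int(result_bin,2)
-- 	return result
-- ===== SOURCE B (Python) =====
-- def not_func(a):
--     m = abs(a)
--     L = max(m.bit_length(), 1)
--     return (1 << L) - 1 - m
-- ===== Notes on version B (the rewrite author's own statement) =====
-- stated objective: simpler
-- what changed: Replaces the binary-string flip loop and base-two reparse with a closed-form arithmetic identity: a power of two determined by the magnitude's bit length, minus one, minus the magnitude.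
import Mathlib
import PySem

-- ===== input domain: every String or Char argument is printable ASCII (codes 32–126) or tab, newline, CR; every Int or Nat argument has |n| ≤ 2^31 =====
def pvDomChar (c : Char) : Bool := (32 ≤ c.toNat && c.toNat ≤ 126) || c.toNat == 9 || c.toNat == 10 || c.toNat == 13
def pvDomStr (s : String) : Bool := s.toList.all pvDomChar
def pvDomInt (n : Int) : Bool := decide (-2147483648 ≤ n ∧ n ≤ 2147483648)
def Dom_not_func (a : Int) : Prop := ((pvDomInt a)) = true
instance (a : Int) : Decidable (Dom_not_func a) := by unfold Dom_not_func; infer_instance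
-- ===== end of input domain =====

-- B replaces A's binary-string flip loop with the closed-form (2^L) - 1 - |a|; equivalence proved for all Int.

-- ===== PORT A =====
-- hand port of Python's "{0:b}".format for a positive magnitude: digits most-significant first
def pyBin (n : Nat) : List Char :=
  if h : n = 0 then []
  else pyBin (n / 2) ++ [if n % 2 = 1 then '1' else '0']
decreasing_by exact Nat.div_lt_self (Nat.pos_of_ne_zero h) (by norm_num)

-- "{0:b}".format(a): '-' sign then magnitude digits; bin(0) = "0"
def pyFormatB (a : Int) : List Char :=
  if a < 0 then '-' :: (if a.natAbs = 0 then ['0'] else pyBin a.natAbs)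
  else (if a.natAbs = 0 then ['0'] else pyBin a.natAbs)

def not_func (a : Int) : Int :=
  let a_bin := pyFormatB a
  let result_bin := a_bin.foldl
    (fun s x => if x = '0' then s ++ ['1'] else if x = '1' then s ++ ['0'] else s)
    ([] : List Char)
  -- int(result_bin, 2), ported by hand: exact base-2 parse over '0'/'1' digits
  result_bin.foldl (fun acc c => acc * 2 + (if c = '1' then 1 else 0)) (0 : Int)

-- ===== PORT B =====
-- hand port of int.bit_length()
def bitLen (n : Nat) : Nat :=
  if h : n = 0 then 0 else bitLen (n / 2) + 1
decreasing_by exact Nat.div_lt_self (Nat.pos_of_ne_zero h) (by norm_num)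

def not_func_alt (a : Int) : Int :=
  let m : Nat := a.natAbs
  let L : Nat := max (bitLen m) 1
  (2 : Int) ^ L - 1 - (m : Int)

-- ===== PRECONDITION & SPEC =====
def Spec_not_func (a : Int) (out : Int) : Prop := out = not_func_alt a
instance (a : Int) (out : Int) : Decidable (Spec_not_func a out) := by unfold Spec_not_func; infer_instance

-- ===== CLAIM (what is proved, stated in full; the proofs are below) =====
def Claim_equal_not_func : Prop := ∀ (a : Int), Dom_not_func a → Spec_not_func a (not_func a)

-- ===== LEMMAS AND PROOFS =====

-- the flip-fold appends to its accumulator, so it factors through the empty accumulator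
lemma flipFold_factor (l : List Char) (s : List Char) :
    l.foldl (fun s x => if x = '0' then s ++ ['1'] else if x = '1' then s ++ ['0'] else s) s
      = s ++ l.foldl (fun s x => if x = '0' then s ++ ['1'] else if x = '1' then s ++ ['0'] else s) [] := by
  induction l generalizing s with
  | nil => simp
  | cons x t ih =>
    simp only [List.foldl_cons]
    rw [ih, ih (if x = '0' then [] ++ ['1'] else if x = '1' then [] ++ ['0'] else [])]
    split_ifs <;> simp

-- base-2 parse of a list ending in one digit
lemma parse_concat (l : List Char) (c : Char) :
    (l ++ [c]).foldl (fun acc c => acc * 2 + (if c = '1' then 1 else 0)) (0 : Int)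
      = l.foldl (fun acc c => acc * 2 + (if c = '1' then 1 else 0)) (0 : Int) * 2
        + (if c = '1' then 1 else 0) := by
  simp [List.foldl_append]

-- key invariant: flipping the binary digits of n and reparsing gives 2^(bitLen n) - 1 - n
lemma key (n : Nat) :
    ((pyBin n).foldl
      (fun s x => if x = '0' then s ++ ['1'] else if x = '1' then s ++ ['0'] else s)
      ([] : List Char)).foldl (fun acc c => acc * 2 + (if c = '1' then 1 else 0)) (0 : Int)
      = 2 ^ (bitLen n) - 1 - (n : Int) := by
  induction n using Nat.strong_induction_on with
  | _ n ih =>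
    by_cases h : n = 0
    · subst h; simp [pyBin, bitLen]
    · rw [pyBin, dif_neg h, bitLen, dif_neg h]
      rw [List.foldl_append, List.foldl_cons, List.foldl_nil, flipFold_factor]
      have ihn := ih (n / 2) (Nat.div_lt_self (Nat.pos_of_ne_zero h) (by norm_num))
      have hdm : 2 * (n / 2) + n % 2 = n := Nat.div_add_mod' n 2 ▸ by omega
      rcases Nat.mod_two_eq_zero_or_one n with hb | hb
      · -- n even: last digit '0' flips to '1'
        simp only [hb, List.nil_append]
        norm_num
        rw [ihn, pow_succ]
        have : (n : Int) = 2 * ((n / 2 : Nat) : Int) := by omega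
        rw [this]; ring
      · -- n odd: last digit '1' flips to '0'
        simp only [hb, List.nil_append]
        norm_num
        rw [if_neg (by decide : ('1' : Char) ≠ '0'), parse_concat, ihn, pow_succ,
          if_neg (by decide : ('0' : Char) ≠ '1')]
        have : (n : Int) = 2 * ((n / 2 : Nat) : Int) + 1 := by omega
        rw [this]; ring

lemma bitLen_pos (n : Nat) (h : n ≠ 0) : 1 ≤ bitLen n := by
  rw [bitLen, dif_neg h]; omega

-- magnitude-level equality: the flip-and-parse of binStr m equals B's closed form
lemma mag_eq (m : Nat) :
    ((if m = 0 then ['0'] else pyBin m).foldl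
      (fun s x => if x = '0' then s ++ ['1'] else if x = '1' then s ++ ['0'] else s)
      ([] : List Char)).foldl (fun acc c => acc * 2 + (if c = '1' then 1 else 0)) (0 : Int)
      = 2 ^ (max (bitLen m) 1) - 1 - (m : Int) := by
  by_cases h : m = 0
  · subst h; simp [bitLen]
  · rw [if_neg h, key, Nat.max_eq_left (bitLen_pos m h)]

-- ===== VERDICT (by name: the statement is the Claim_ definition above) =====
theorem not_func_spec : Claim_equal_not_func := by
  intro a _
  unfold Spec_not_func not_func not_func_alt pyFormatB
  by_cases hneg : a < 0
  · rw [if_pos hneg]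
    simpa using mag_eq a.natAbs
  · rw [if_neg hneg]
    exact mag_eq a.natAbs
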